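-- pv_equiv track=rewrite | github.com/joeljosephwebdev/static-site-generator | src/block_markdown.py | is_unordered_list
-- ===== SOURCE A (Python) =====
-- def is_unordered_list(lines):
--     markers = set() # we use a set to track the start of every line
--     for line in lines:
--         if line.startswith("* "):
--             markers.add("*")
--         elif line.startswith("- "):
--             markers.add("-")
--         else:
--             return False # return false if a line begins with a character other than - or *
--
--     return len(markers) == 1 # return true if the set only contains * or -
-- ===== SOURCE B (Python) =====
-- def is_unordered_list(lines):
--     if not lines:
--         return False
--     if lines[0].startswith("* "):
--         marker = "* "
--     elif lines[0].startswith("- "):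
--         marker = "- "
--     else:
--         return False
--     return all(line.startswith(marker) for line in lines)
-- ===== Notes on version B (the rewrite author's own statement) =====
-- stated objective: simpler
-- what changed: B determines the expected marker from the first line and then does one uniform all(startswith) check, instead of accumulating a set of distinct markers and testing its cardinality at the end.
import Mathlib
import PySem

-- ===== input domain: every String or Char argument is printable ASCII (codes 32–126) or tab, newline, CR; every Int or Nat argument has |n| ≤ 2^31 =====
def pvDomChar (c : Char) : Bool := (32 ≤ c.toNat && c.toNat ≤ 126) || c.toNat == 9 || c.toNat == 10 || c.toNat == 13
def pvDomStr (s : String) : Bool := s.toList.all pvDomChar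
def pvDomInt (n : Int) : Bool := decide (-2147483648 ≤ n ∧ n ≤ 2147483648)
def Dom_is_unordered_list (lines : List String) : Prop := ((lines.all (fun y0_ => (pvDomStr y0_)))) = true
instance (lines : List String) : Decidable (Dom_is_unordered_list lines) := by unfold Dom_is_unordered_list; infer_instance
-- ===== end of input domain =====

-- B fixes the expected marker from the first line and verifies it uniformly, instead of
-- accumulating a set of markers and testing its cardinality (objective: simpler).

-- ===== PORT A =====
-- the loop of A: carries the 'markers' set; early 'return False' = result false
def is_unordered_list_go (markers : PySem.Set String) : List String → Bool
  | [] => PySem.Set.len markers == 1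
  | line :: rest =>
    if PySem.Str.startswith line "* " then is_unordered_list_go (PySem.Set.add markers "*") rest
    else if PySem.Str.startswith line "- " then is_unordered_list_go (PySem.Set.add markers "-") rest
    else false

def is_unordered_list (lines : List String) : Bool :=
  is_unordered_list_go PySem.Set.empty lines

-- ===== PORT B =====
def is_unordered_list_alt (lines : List String) : Bool :=
  match lines with
  | [] => false
  | first :: _ =>
    if PySem.Str.startswith first "* " then
      lines.all (fun line => PySem.Str.startswith line "* ")
    else if PySem.Str.startswith first "- " then
      lines.all (fun line => PySem.Str.startswith line "- ")
    else false

-- ===== PRECONDITION & SPEC =====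
def Spec_is_unordered_list (lines : List String) (out : Bool) : Prop := out = is_unordered_list_alt lines
instance (lines : List String) (out : Bool) : Decidable (Spec_is_unordered_list lines out) := by unfold Spec_is_unordered_list; infer_instance

-- ===== CLAIM (what is proved, stated in full; the proofs are below) =====
def Claim_equal_is_unordered_list : Prop := ∀ (lines : List String), Dom_is_unordered_list lines → Spec_is_unordered_list lines (is_unordered_list lines)

-- ===== LEMMAS AND PROOFS =====

-- once both markers are in the set, the final cardinality test can only fail
theorem go_both_star_dash : ∀ (lines : List String),
    is_unordered_list_go (PySem.Set.ofList ["*", "-"]) lines = false := by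
  intro lines
  induction lines with
  | nil => decide
  | cons l rest ih =>
    simp only [is_unordered_list_go]
    have h1 : PySem.Set.add (PySem.Set.ofList ["*", "-"]) "*" = PySem.Set.ofList ["*", "-"] := by decide
    have h2 : PySem.Set.add (PySem.Set.ofList ["*", "-"]) "-" = PySem.Set.ofList ["*", "-"] := by decide
    split_ifs <;> simp only [h1, h2, ih]

theorem go_both_dash_star : ∀ (lines : List String),
    is_unordered_list_go (PySem.Set.ofList ["-", "*"]) lines = false := by
  intro lines
  induction lines with
  | nil => decide
  | cons l rest ih =>
    simp only [is_unordered_list_go]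
    have h1 : PySem.Set.add (PySem.Set.ofList ["-", "*"]) "*" = PySem.Set.ofList ["-", "*"] := by decide
    have h2 : PySem.Set.add (PySem.Set.ofList ["-", "*"]) "-" = PySem.Set.ofList ["-", "*"] := by decide
    split_ifs <;> simp only [h1, h2, ih]

-- with the '*' marker already recorded, A's loop is a uniform "* " prefix check
theorem go_star (lines : List String) :
    is_unordered_list_go (PySem.Set.ofList ["*"]) lines
      = lines.all (fun line => PySem.Str.startswith line "* ") := by
  induction lines with
  | nil => decide
  | cons l rest ih =>
    simp only [is_unordered_list_go, List.all_cons]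
    have h1 : PySem.Set.add (PySem.Set.ofList ["*"]) "*" = PySem.Set.ofList ["*"] := by decide
    have h2 : PySem.Set.add (PySem.Set.ofList ["*"]) "-" = PySem.Set.ofList ["*", "-"] := by decide
    split_ifs with hs hd
    · rw [h1, ih]; simp only [List.all_cons, hs, Bool.true_and]
    · rw [h2, go_both_star_dash]
      simp only [Bool.not_eq_true] at hs
      simp only [hs, Bool.false_and]
    · simp only [Bool.not_eq_true] at hs
      simp only [hs, Bool.false_and]

-- a line starting with "* " cannot also start with "- "
theorem startswith_star_not_dash (l : String) (h : PySem.Str.startswith l "* " = true) :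
    PySem.Str.startswith l "- " = false := by
  obtain ⟨t, ht⟩ := (PySem.Chars.startswith_iff _ _).mp (by simpa using h)
  by_contra hc
  rw [Bool.not_eq_false] at hc
  obtain ⟨u, hu⟩ := (PySem.Chars.startswith_iff _ _).mp (by simpa using hc)
  have := ht.trans hu.symm
  simp at this

-- symmetric for the '-' marker
theorem go_dash (lines : List String) :
    is_unordered_list_go (PySem.Set.ofList ["-"]) lines
      = lines.all (fun line => PySem.Str.startswith line "- ") := by
  induction lines with
  | nil => decide
  | cons l rest ih =>
    simp only [is_unordered_list_go, List.all_cons]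
    have h1 : PySem.Set.add (PySem.Set.ofList ["-"]) "-" = PySem.Set.ofList ["-"] := by decide
    have h2 : PySem.Set.add (PySem.Set.ofList ["-"]) "*" = PySem.Set.ofList ["-", "*"] := by decide
    split_ifs with hs hd
    · rw [h2, go_both_dash_star]
      simp only [startswith_star_not_dash l hs, Bool.false_and]
    · rw [h1, ih]; simp only [List.all_cons, hd, Bool.true_and]
    · simp only [Bool.not_eq_true] at hd
      simp only [hd, Bool.false_and]

-- ===== VERDICT (by name: the statement is the Claim_ definition above) =====
theorem is_unordered_list_spec : Claim_equal_is_unordered_list := by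
  intro lines _
  unfold Spec_is_unordered_list is_unordered_list is_unordered_list_alt
  cases lines with
  | nil => decide
  | cons first rest =>
    simp only [is_unordered_list_go]
    have h1 : PySem.Set.add PySem.Set.empty "*" = PySem.Set.ofList ["*"] := by decide
    have h2 : PySem.Set.add PySem.Set.empty "-" = PySem.Set.ofList ["-"] := by decide
    split_ifs with hs hd
    · rw [h1, go_star]; simp only [List.all_cons, hs, Bool.true_and]
    · rw [h2, go_dash]; simp only [List.all_cons, hd, Bool.true_and]
    · rfl
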